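-- pv_equiv track=rewrite | github.com/AmrYami/co-pilot | apps/dw/routes/__init__.py | _collect_request_type_synonyms
-- ===== SOURCE A (Python) =====
-- from typing import Any, Dict, Iterable, List, Optional, Tuple
--
-- def _dedupe_upper(values: Iterable[Any]) -> List[str]:
--     seen: set[str] = set()
--     ordered: List[str] = []
--     for raw in values:
--         if not isinstance(raw, str):
--             continue
--         text = raw.strip()
--         if not text:
--             continue
--         upper = text.upper()
--         if upper in seen:
--             continue
--         seen.add(upper)
--         ordered.append(upper)
--     return ordered
--
-- def _collect_request_type_synonyms(
--     values: Iterable[str],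
--     mapping: Dict[str, Dict[str, Iterable[Any]]],
-- ) -> Tuple[List[str], List[str], List[str]]:
--     equals: List[str] = []
--     prefixes: List[str] = []
--     contains: List[str] = []
--     for raw in values:
--         if not isinstance(raw, str):
--             continue
--         text = raw.strip()
--         if not text:
--             continue
--         upper = text.upper()
--         equals.append(upper)
--         for key, spec in mapping.items():
--             if not isinstance(spec, dict):
--                 continue
--             key_upper = str(key).strip().upper()
--             eq_list = _dedupe_upper(spec.get("equals", []))
--             if upper == key_upper or upper in eq_list:
--                 equals.extend(eq_list or [key_upper])
--                 prefixes.extend(_dedupe_upper(spec.get("prefix", [])))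
--                 contains.extend(_dedupe_upper(spec.get("contains", [])))
--                 break
--     return _dedupe_upper(equals), _dedupe_upper(prefixes), _dedupe_upper(contains)
-- ===== SOURCE B (Python) =====
-- from typing import Any, Dict, Iterable, List, Tuple
--
--
-- def _norm(vals: Iterable[Any]) -> List[str]:
--     # ordered dedup of the stripped, uppercased string entries (dict keeps first insertion)
--     ordered: Dict[str, None] = {}
--     for raw in vals:
--         if isinstance(raw, str) and raw.strip():
--             ordered[raw.strip().upper()] = None
--     return list(ordered)
--
--
-- def _collect_request_type_synonyms(
--     values: Iterable[str],
--     mapping: Dict[str, Dict[str, Iterable[Any]]],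
-- ) -> Tuple[List[str], List[str], List[str]]:
--     # Stage 1: parse the mapping ONCE into a token -> (equals, prefix, contains) index;
--     # setdefault = first insertion wins, which matches A's first-matching-key scan.
--     index: Dict[str, Tuple[List[str], List[str], List[str]]] = {}
--     for key, spec in mapping.items():
--         if not isinstance(spec, dict):
--             continue
--         k = str(key).strip().upper()
--         eqs = _norm(spec.get("equals", []))
--         payload = (eqs or [k], _norm(spec.get("prefix", [])), _norm(spec.get("contains", [])))
--         for tok in [k] + eqs:
--             index.setdefault(tok, payload)
--     # Stage 2: normalize the values, look each token up, and flatten by comprehension.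
--     empty: Tuple[List[str], List[str], List[str]] = ([], [], [])
--     tokens = [v.strip().upper() for v in values if isinstance(v, str) and v.strip()]
--     trips = [index.get(t, empty) for t in tokens]
--     equals = [x for t, (e, _, _) in zip(tokens, trips) for x in [t] + e]
--     prefixes = [x for (_, p, _) in trips for x in p]
--     contains = [x for (_, _, c) in trips for x in c]
--     return _norm(equals), _norm(prefixes), _norm(contains)
-- ===== Notes on version B (the rewrite author's own statement) =====
-- stated objective: faster
-- what changed: B is staged: it parses the mapping once into a token->(equals,prefix,contains) index (setdefault = first insertion wins, matching A's first-matching-key scan), then normalizes the values into a token list and builds the three results by comprehension/flatten over O(1) index lookups, instead of A's single accumulator loop that rescans and re-deduplicates every mapping spec for every value.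
import Mathlib
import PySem

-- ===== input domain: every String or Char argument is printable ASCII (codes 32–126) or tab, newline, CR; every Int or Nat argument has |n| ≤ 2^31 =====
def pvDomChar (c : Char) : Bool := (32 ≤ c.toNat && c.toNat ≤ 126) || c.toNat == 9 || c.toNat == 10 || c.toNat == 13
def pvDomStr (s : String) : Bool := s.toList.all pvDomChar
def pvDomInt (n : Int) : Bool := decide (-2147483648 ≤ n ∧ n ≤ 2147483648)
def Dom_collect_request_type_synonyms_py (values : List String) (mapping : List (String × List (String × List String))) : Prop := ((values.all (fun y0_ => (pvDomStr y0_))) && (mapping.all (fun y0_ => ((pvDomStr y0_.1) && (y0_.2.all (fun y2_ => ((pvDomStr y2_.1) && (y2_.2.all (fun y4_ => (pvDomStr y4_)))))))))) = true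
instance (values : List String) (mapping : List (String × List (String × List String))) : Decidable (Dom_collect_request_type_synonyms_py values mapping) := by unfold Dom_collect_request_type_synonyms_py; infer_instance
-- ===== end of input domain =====

-- B replaces A's single accumulator loop (rescanning the mapping per value) by two staged
-- passes: a token→payload index built once from the mapping, then comprehension-style
-- flattening over O(1) lookups; return value only.

-- ===== PORT A =====

-- _dedupe_upper: fold carrying (seen-set, ordered-list) exactly as the Python does
def pvDedupeUpperA (values : List String) : List String :=
  (values.foldl
    (fun (st : PySem.Set String × List String) raw =>
      let text := PySem.Str.strip raw
      if text = "" then st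
      else
        let upper := PySem.Str.upper text
        if PySem.Set.contains st.1 upper then st
        else (PySem.Set.add st.1 upper, st.2 ++ [upper]))
    (PySem.Set.empty, [])).2

-- the inner 'for key, spec in mapping.items(): … break' loop of A
def pvInnerA (upper : String) (mapping : List (String × List (String × List String)))
    (equals prefixes contains : List String) : List String × List String × List String :=
  match mapping with
  | [] => (equals, prefixes, contains)
  | (key, spec) :: rest =>
    let key_upper := PySem.Str.upper (PySem.Str.strip key)
    let eq_list := pvDedupeUpperA (PySem.Dict.getD (PySem.Dict.mk spec) "equals" [])
    if upper = key_upper ∨ upper ∈ eq_list then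
      (equals ++ (if eq_list = [] then [key_upper] else eq_list),
       prefixes ++ pvDedupeUpperA (PySem.Dict.getD (PySem.Dict.mk spec) "prefix" []),
       contains ++ pvDedupeUpperA (PySem.Dict.getD (PySem.Dict.mk spec) "contains" []))
    else pvInnerA upper rest equals prefixes contains

def collect_request_type_synonyms_py (values : List String) (mapping : List (String × List (String × List String))) : List String × List String × List String :=
  let st := values.foldl
    (fun (st : List String × List String × List String) raw =>
      let text := PySem.Str.strip raw
      if text = "" then st
      else
        let upper := PySem.Str.upper text
        pvInnerA upper mapping (st.1 ++ [upper]) st.2.1 st.2.2)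
    ([], [], [])
  (pvDedupeUpperA st.1, pvDedupeUpperA st.2.1, pvDedupeUpperA st.2.2)

-- ===== PORT B =====

-- _norm: ordered dict whose keys are the stripped/uppercased entries, then list(ordered)
def pvNormB (vals : List String) : List String :=
  (vals.foldl
    (fun (d : PySem.Dict String Unit) raw =>
      if PySem.Str.strip raw = "" then d
      else d.insert (PySem.Str.upper (PySem.Str.strip raw)) ())
    PySem.Dict.empty).keys

-- stage 1: token → (equals, prefix, contains) index; setdefault = first insertion wins
def pvIndexB (mapping : List (String × List (String × List String))) :
    PySem.Dict String (List String × List String × List String) :=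
  mapping.foldl
    (fun d ks =>
      let k := PySem.Str.upper (PySem.Str.strip ks.1)
      let eqs := pvNormB (PySem.Dict.getD (PySem.Dict.mk ks.2) "equals" [])
      let payload := ((if eqs = [] then [k] else eqs),
                      pvNormB (PySem.Dict.getD (PySem.Dict.mk ks.2) "prefix" []),
                      pvNormB (PySem.Dict.getD (PySem.Dict.mk ks.2) "contains" []))
      (k :: eqs).foldl (fun d t => d.setdefault t payload) d)
    PySem.Dict.empty

def collect_request_type_synonyms_py_alt (values : List String) (mapping : List (String × List (String × List String))) : List String × List String × List String :=
  let index := pvIndexB mapping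
  let tokens := values.filterMap (fun v =>
    if PySem.Str.strip v = "" then none else some (PySem.Str.upper (PySem.Str.strip v)))
  let trips := tokens.map (fun t => index.getD t ([], [], []))
  let equals := (tokens.zip trips).flatMap (fun p => p.1 :: p.2.1)
  let prefixes := trips.flatMap (fun p => p.2.1)
  let contains := trips.flatMap (fun p => p.2.2)
  (pvNormB equals, pvNormB prefixes, pvNormB contains)

-- ===== PRECONDITION & SPEC =====
def Spec_collect_request_type_synonyms_py (values : List String) (mapping : List (String × List (String × List String))) (out : List String × List String × List String) : Prop := out = collect_request_type_synonyms_py_alt values mapping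
instance (values : List String) (mapping : List (String × List (String × List String))) (out : List String × List String × List String) : Decidable (Spec_collect_request_type_synonyms_py values mapping out) := by unfold Spec_collect_request_type_synonyms_py; infer_instance

-- ===== CLAIM (what is proved, stated in full; the proofs are below) =====
def Claim_equal_collect_request_type_synonyms_py : Prop := ∀ (values : List String) (mapping : List (String × List (String × List String))), Dom_collect_request_type_synonyms_py values mapping → Spec_collect_request_type_synonyms_py values mapping (collect_request_type_synonyms_py values mapping)

-- ===== LEMMAS AND PROOFS =====

-- the stripped-uppercased element produced by one loop step, shared by both normalizers
def pvNormF (raw : String) : Option String :=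
  if PySem.Str.strip raw = "" then none else some (PySem.Str.upper (PySem.Str.strip raw))

-- named copy of A's _dedupe_upper loop body
def pvStepA (st : PySem.Set String × List String) (raw : String) :
    PySem.Set String × List String :=
  let text := PySem.Str.strip raw
  if text = "" then st
  else
    let upper := PySem.Str.upper text
    if PySem.Set.contains st.1 upper then st
    else (PySem.Set.add st.1 upper, st.2 ++ [upper])

lemma pvStepA_diag (s : List String) (x : String) :
    pvStepA (s, s) x = ((pvNormF x).elim s (PySem.Set.add s),
                        (pvNormF x).elim s (PySem.Set.add s)) := by
  unfold pvStepA pvNormF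
  by_cases h : PySem.Str.strip x = ""
  · simp [h]
  · simp only [h, if_false, Option.elim]
    by_cases hc : PySem.Set.contains s (PySem.Str.upper (PySem.Str.strip x)) = true
    · have hm : PySem.Str.upper (PySem.Str.strip x) ∈ s := by simpa using hc
      simp [hm, PySem.Set.add]
    · have hm : PySem.Str.upper (PySem.Str.strip x) ∉ s := by simpa using hc
      simp [hm, PySem.Set.add]

lemma pvFoldA_diag (xs : List String) (s : List String) :
    xs.foldl pvStepA (s, s) =
      ((xs.filterMap pvNormF).foldl PySem.Set.add s,
       (xs.filterMap pvNormF).foldl PySem.Set.add s) := by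
  induction xs generalizing s with
  | nil => rfl
  | cons x xs ih =>
    rw [List.foldl_cons, pvStepA_diag, List.filterMap_cons]
    cases hx : pvNormF x with
    | none => rw [hx] at *; simpa using ih s
    | some u => rw [hx] at *; simpa using ih (PySem.Set.add s u)

-- named copy of B's _norm loop body
def pvStepB (d : PySem.Dict String Unit) (raw : String) : PySem.Dict String Unit :=
  if PySem.Str.strip raw = "" then d
  else d.insert (PySem.Str.upper (PySem.Str.strip raw)) ()

lemma keys_insert_eq_set_add (d : PySem.Dict String Unit) (k : String) :
    (d.insert k ()).keys = PySem.Set.add d.keys k := by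
  by_cases h : d.contains k = true
  · rw [PySem.Dict.keys_insert_of_contains _ _ h]
    have : k ∈ d.keys := (PySem.Dict.contains_iff_mem_keys d k).1 h
    simp [PySem.Set.add, this]
  · have h' : d.contains k = false := by simpa using h
    rw [PySem.Dict.keys_insert_of_not_contains _ _ h']
    have : k ∉ d.keys := fun hm => h ((PySem.Dict.contains_iff_mem_keys d k).2 hm)
    simp [PySem.Set.add, this]

lemma pvFoldB_keys (xs : List String) (d : PySem.Dict String Unit) :
    (xs.foldl pvStepB d).keys = (xs.filterMap pvNormF).foldl PySem.Set.add d.keys := by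
  induction xs generalizing d with
  | nil => rfl
  | cons x xs ih =>
    rw [List.foldl_cons, List.filterMap_cons]
    cases hx : pvNormF x with
    | none =>
      have : pvStepB d x = d := by
        unfold pvStepB; unfold pvNormF at hx
        by_cases h : PySem.Str.strip x = "" <;> simp [h] at hx ⊢
      rw [this, ih]
    | some u =>
      have hs : PySem.Str.strip x ≠ "" ∧ PySem.Str.upper (PySem.Str.strip x) = u := by
        unfold pvNormF at hx
        by_cases h : PySem.Str.strip x = "" <;> simp [h] at hx
        exact ⟨h, hx⟩
      have : pvStepB d x = d.insert u () := by
        unfold pvStepB; rw [if_neg hs.1, hs.2]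
      rw [this, List.foldl_cons, ih, keys_insert_eq_set_add]

lemma pvNorm_eq (xs : List String) : pvDedupeUpperA xs = pvNormB xs := by
  show (xs.foldl pvStepA (PySem.Set.empty, [])).2 = (xs.foldl pvStepB PySem.Dict.empty).keys
  have h1 : (PySem.Set.empty : PySem.Set String) = ([] : List String) := rfl
  rw [show ((PySem.Set.empty, []) : PySem.Set String × List String) = (([] : List String), ([] : List String)) from rfl,
      pvFoldA_diag, pvFoldB_keys]
  rfl

-- first-match scan of the mapping, as an Option payload
def pvScan (upper : String) : List (String × List (String × List String)) →
    Option (List String × List String × List String)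
  | [] => none
  | (key, spec) :: rest =>
    let key_upper := PySem.Str.upper (PySem.Str.strip key)
    let eq_list := pvNormB (PySem.Dict.getD (PySem.Dict.mk spec) "equals" [])
    if upper = key_upper ∨ upper ∈ eq_list then
      some ((if eq_list = [] then [key_upper] else eq_list),
            pvNormB (PySem.Dict.getD (PySem.Dict.mk spec) "prefix" []),
            pvNormB (PySem.Dict.getD (PySem.Dict.mk spec) "contains" []))
    else pvScan upper rest

lemma pvInnerA_eq_scan (upper : String) (m : List (String × List (String × List String)))
    (e p c : List String) :
    pvInnerA upper m e p c =
      match pvScan upper m with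
      | none => (e, p, c)
      | some pl => (e ++ pl.1, p ++ pl.2.1, c ++ pl.2.2) := by
  induction m with
  | nil => rfl
  | cons ks rest ih =>
    obtain ⟨key, spec⟩ := ks
    simp only [pvInnerA, pvNorm_eq]
    by_cases h : upper = PySem.Str.upper (PySem.Str.strip key) ∨
        upper ∈ pvNormB (PySem.Dict.getD (PySem.Dict.mk spec) "equals" [])
    · rw [if_pos h]; simp [pvScan, h]
    · rw [if_neg h, ih]; simp [pvScan, h]

lemma pvSetdefaultFold_get (ts : List String)
    (pl : List String × List String × List String)
    (d : PySem.Dict String (List String × List String × List String)) (u : String) :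
    (ts.foldl (fun d t => d.setdefault t pl) d).get? u =
      match d.get? u with
      | some q => some q
      | none => if u ∈ ts then some pl else none := by
  induction ts generalizing d with
  | nil => cases h : d.get? u <;> simp [h]
  | cons t ts ih =>
    rw [List.foldl_cons, ih]
    by_cases ht : u = t
    · subst ht
      rw [PySem.Dict.get?_setdefault_self]
      cases h : d.get? u <;> simp
    · rw [PySem.Dict.get?_setdefault_of_ne _ _ ht]
      cases h : d.get? u <;> simp [ht]

-- named copy of B's index-building loop body
def pvStepIdx (d : PySem.Dict String (List String × List String × List String))
    (ks : String × List (String × List String)) :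
    PySem.Dict String (List String × List String × List String) :=
  let k := PySem.Str.upper (PySem.Str.strip ks.1)
  let eqs := pvNormB (PySem.Dict.getD (PySem.Dict.mk ks.2) "equals" [])
  let payload := ((if eqs = [] then [k] else eqs),
                  pvNormB (PySem.Dict.getD (PySem.Dict.mk ks.2) "prefix" []),
                  pvNormB (PySem.Dict.getD (PySem.Dict.mk ks.2) "contains" []))
  (k :: eqs).foldl (fun d t => d.setdefault t payload) d

lemma pvIndexFold_get (u : String) (m : List (String × List (String × List String)))
    (d : PySem.Dict String (List String × List String × List String)) :
    (m.foldl pvStepIdx d).get? u =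
      match d.get? u with
      | some q => some q
      | none => pvScan u m := by
  induction m generalizing d with
  | nil => cases h : d.get? u <;> simp [pvScan, h]
  | cons ks rest ih =>
    obtain ⟨key, spec⟩ := ks
    rw [List.foldl_cons, ih]
    show (match (pvStepIdx d (key, spec)).get? u with
          | some q => some q
          | none => pvScan u rest) = _
    unfold pvStepIdx
    rw [pvSetdefaultFold_get]
    cases h : d.get? u with
    | some q => simp
    | none =>
      by_cases hm : u = PySem.Str.upper (PySem.Str.strip key) ∨
          u ∈ pvNormB (PySem.Dict.getD (PySem.Dict.mk spec) "equals" [])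
      · have hmem : u ∈ PySem.Str.upper (PySem.Str.strip key) ::
            pvNormB (PySem.Dict.getD (PySem.Dict.mk spec) "equals" []) := by simpa using hm
        simp [pvScan, hm, hmem]
      · have hmem : u ∉ PySem.Str.upper (PySem.Str.strip key) ::
            pvNormB (PySem.Dict.getD (PySem.Dict.mk spec) "equals" []) := by simpa using hm
        simp [pvScan, hm, hmem]

lemma pvIndex_get (u : String) (m : List (String × List (String × List String))) :
    (pvIndexB m).get? u = pvScan u m := by
  show (m.foldl pvStepIdx PySem.Dict.empty).get? u = pvScan u m
  rw [pvIndexFold_get]; simp [PySem.Dict.get?_empty]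

-- per-token contribution to the three lists, via the index
def pvPay (mapping : List (String × List (String × List String))) (t : String) :
    List String × List String × List String :=
  (pvIndexB mapping).getD t ([], [], [])

-- A's value loop flattens to per-token chunks
lemma pvFoldVal (mapping : List (String × List (String × List String)))
    (xs : List String) (st : List String × List String × List String) :
    xs.foldl
      (fun (st : List String × List String × List String) raw =>
        let text := PySem.Str.strip raw
        if text = "" then st
        else
          let upper := PySem.Str.upper text
          pvInnerA upper mapping (st.1 ++ [upper]) st.2.1 st.2.2)
      st =
      (st.1 ++ (xs.filterMap pvNormF).flatMap (fun t => t :: (pvPay mapping t).1),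
       st.2.1 ++ (xs.filterMap pvNormF).flatMap (fun t => (pvPay mapping t).2.1),
       st.2.2 ++ (xs.filterMap pvNormF).flatMap (fun t => (pvPay mapping t).2.2)) := by
  induction xs generalizing st with
  | nil => simp
  | cons x xs ih =>
    rw [List.foldl_cons, List.filterMap_cons]
    cases hx : pvNormF x with
    | none =>
      have hs : PySem.Str.strip x = "" := by
        unfold pvNormF at hx
        by_cases h : PySem.Str.strip x = ""
        · exact h
        · simp [h] at hx
      rw [ih]
      simp [hs]
    | some u =>
      have hs : PySem.Str.strip x ≠ "" ∧ PySem.Str.upper (PySem.Str.strip x) = u := by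
        unfold pvNormF at hx
        by_cases h : PySem.Str.strip x = "" <;> simp [h] at hx
        exact ⟨h, hx⟩
      have hpay : pvPay mapping u =
          match pvScan u mapping with
          | none => ([], [], [])
          | some pl => pl := by
        unfold pvPay
        rw [PySem.Dict.getD, pvIndex_get]
        cases pvScan u mapping <;> rfl
      rw [ih]
      simp only [hs.1, hs.2, pvInnerA_eq_scan]
      cases hscan : pvScan u mapping with
      | none => simp [hpay, hscan]
      | some pl => simp [hpay, hscan]

-- zip-with-map flattening used by B collapses to a flatMap over the tokens
lemma pvZipFlat (f : String → List String × List String × List String)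
    (g : String → (List String × List String × List String) → List String)
    (ts : List String) :
    ((ts.zip (ts.map f)).flatMap (fun p => g p.1 p.2)) = ts.flatMap (fun t => g t (f t)) := by
  induction ts with
  | nil => rfl
  | cons t ts ih => simp [List.zip_cons_cons, ih]

-- ===== VERDICT (by name: the statement is the Claim_ definition above) =====
theorem collect_request_type_synonyms_py_spec : Claim_equal_collect_request_type_synonyms_py := by
  intro values mapping _
  unfold Spec_collect_request_type_synonyms_py
  unfold collect_request_type_synonyms_py collect_request_type_synonyms_py_alt
  have htok : values.filterMap (fun v =>
      if PySem.Str.strip v = "" then none else some (PySem.Str.upper (PySem.Str.strip v)))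
      = values.filterMap pvNormF := by
    apply List.filterMap_congr; intro v _; rfl
  rw [pvFoldVal mapping values ([], [], [])]
  simp only [List.nil_append, pvNorm_eq, htok]
  rw [pvZipFlat (fun t => (pvIndexB mapping).getD t ([], [], [])) (fun t p => t :: p.1)]
  have h2 : ((values.filterMap pvNormF).map
        (fun t => (pvIndexB mapping).getD t ([], [], []))).flatMap (fun p => p.2.1)
      = (values.filterMap pvNormF).flatMap (fun t => (pvPay mapping t).2.1) := by
    rw [List.flatMap_map]; rfl
  have h3 : ((values.filterMap pvNormF).map
        (fun t => (pvIndexB mapping).getD t ([], [], []))).flatMap (fun p => p.2.2)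
      = (values.filterMap pvNormF).flatMap (fun t => (pvPay mapping t).2.2) := by
    rw [List.flatMap_map]; rfl
  rw [h2, h3]
  rfl
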